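-- pv_equiv track=rewrite | github.com/chhaewxn/Algorithm-Study | 프로그래머스/2/84512. 모음 사전/모음 사전.py | solution
-- ===== SOURCE A (Python) =====
-- def solution(word):
--     # 모음과 각 자리수별 가중치를 정의
--     vowels = ['A', 'E', 'I', 'O', 'U']
--
--     # 각 자리수별 가중치 계산
--     weights = [781, 156, 31, 6, 1]
--
--     # 순서 계산
--     order = 0
--     for i, char in enumerate(word):
--         vowel_index = vowels.index(char)
--         order += vowel_index * weights[i] + 1
--
--     return order
-- ===== SOURCE B (Python) =====
-- def solution(word):
--     # Build the whole vowel dictionary (rank order) by DFS, then look the word up.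
--     table = []
--
--     def dfs(s):
--         table.append(s)
--         if len(s) < 5:
--             for v in 'AEIOU':
--                 dfs(s + v)
--
--     dfs('')
--     return table.index(word)
-- ===== Notes on version B (the rewrite author's own statement) =====
-- stated objective: idiomatic
-- what changed: A computes the rank by a closed-form weighted sum with hard-coded per-position weights; B generates the whole vowel dictionary in order by DFS and returns the word's index in that table.
import Mathlib
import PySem

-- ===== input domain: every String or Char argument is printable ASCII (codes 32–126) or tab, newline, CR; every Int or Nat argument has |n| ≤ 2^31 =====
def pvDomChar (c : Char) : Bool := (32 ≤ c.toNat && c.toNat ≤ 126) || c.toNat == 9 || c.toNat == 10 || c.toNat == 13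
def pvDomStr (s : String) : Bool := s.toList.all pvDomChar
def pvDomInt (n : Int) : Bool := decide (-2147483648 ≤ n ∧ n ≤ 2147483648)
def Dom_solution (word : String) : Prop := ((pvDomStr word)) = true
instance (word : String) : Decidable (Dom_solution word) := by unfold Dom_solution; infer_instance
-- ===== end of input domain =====

-- B replaces A's closed-form weighted sum with generating the whole vowel dictionary in rank
-- order by DFS and returning the word's index in that table (more idiomatic; same cost class).

-- ===== PORT A =====
def pvVowels : List Char := ['A', 'E', 'I', 'O', 'U']

def pvWeights : List Int := [781, 156, 31, 6, 1]

-- 'vowels.index(char)' raises ValueError and 'weights[i]' raises IndexError outside Pre_;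
-- the '.getD 0' defaults are never reached on inputs satisfying Pre_solution.
def solution (word : String) : Int :=
  (PySem.List.enumerate word.toList 0).foldl
    (fun order p =>
      order + (((PySem.List.index? pvVowels p.2).getD 0 : Nat) : Int)
              * PySem.List.pyGetD pvWeights p.1 0 + 1) 0

-- ===== PORT B =====
-- literal transliteration of Source B's dfs: append the current string, then recurse on s + v
-- for each vowel while len(s) < 5; the collected table is returned in DFS (= rank) order.
def dfsB (s : List Char) : List (List Char) :=
  if _h : s.length < 5 then
    s :: pvVowels.flatMap (fun v => dfsB (s ++ [v]))
  else [s]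
termination_by 5 - s.length
decreasing_by simp; omega

-- 'table.index(word)' raises ValueError outside Pre_; '.getD 0' is never reached inside Pre_.
def solution_alt (word : String) : Int :=
  (((PySem.List.index? (dfsB []) word.toList).getD 0 : Nat) : Int)

-- ===== PRECONDITION & SPEC =====
-- Pre_ excludes exactly the inputs on which A raises: a character outside AEIOU
-- (ValueError from vowels.index) or a word longer than 5 (IndexError from weights[i]).
def Pre_solution (word : String) : Prop :=
  word.toList.length ≤ 5 ∧ word.toList.all pvVowels.contains = true

instance (word : String) : Decidable (Pre_solution word) := by
  unfold Pre_solution; infer_instance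

def pvWitness_solution : String := "EIO"

def Spec_solution (word : String) (out : Int) : Prop := out = solution_alt word
instance (word : String) (out : Int) : Decidable (Spec_solution word out) := by
  unfold Spec_solution; infer_instance

-- ===== CLAIM (what is proved, stated in full; the proofs are below) =====
def Claim_equal_solution : Prop :=
  ∀ (word : String), Dom_solution word → Pre_solution word → Spec_solution word (solution word)

-- ===== LEMMAS AND PROOFS =====

-- size of the DFS subtree rooted at a prefix of length d
def pvS (d : Nat) : Nat :=
  if d < 5 then 1 + 5 * pvS (d + 1) else 1
termination_by 5 - d

-- the rank both programs compute, as structural recursion over the word at depth d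
def pvRank : List Char → Nat → Nat
  | [], _ => 0
  | c :: rest, d => pvVowels.idxOf c * pvS (d + 1) + 1 + pvRank rest (d + 1)

theorem index?_append_of_not_mem {α : Type} [BEq α] [LawfulBEq α]
    (l t : List α) (v : α) (h : v ∉ l) :
    PySem.List.index? (l ++ t) v = (PySem.List.index? t v).map (· + l.length) := by
  induction l with
  | nil => simp [PySem.List.index?_eq_idxOf?]
  | cons x l ih =>
    have hx : x ≠ v := by rintro rfl; simp at h
    rw [List.cons_append, PySem.List.index?_cons_of_ne _ hx,
        ih (fun hm => h (List.mem_cons_of_mem _ hm))]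
    cases PySem.List.index? t v
    · simp
    · simp; omega

theorem dfsB_length (s : List Char) : (dfsB s).length = pvS s.length := by
  fun_induction dfsB s with
  | case1 s h ih =>
    rw [pvS]
    simp only [if_pos h, List.length_cons, pvVowels, List.flatMap_cons, List.flatMap_nil,
      List.length_append, List.length_nil]
    have e : ∀ v : Char, (dfsB (s ++ [v])).length = pvS (s.length + 1) := by
      intro v
      simpa using ih v
    rw [e, e, e, e, e]; ring
  | case2 s h => rw [pvS]; simp [if_neg h]

theorem dfsB_prefix (s : List Char) : ∀ x ∈ dfsB s, s <+: x := by
  fun_induction dfsB s with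
  | case1 s h ih =>
    intro x hx
    rcases List.mem_cons.mp hx with rfl | hx
    · exact List.prefix_refl x
    · rcases List.mem_flatMap.mp hx with ⟨v, hv, hxv⟩
      exact ((s.prefix_append [v]).trans (ih v x hxv))
  | case2 s h =>
    intro x hx
    simp at hx; subst hx; exact List.prefix_refl x

theorem not_mem_dfsB_of_ne (s rest : List Char) (v c : Char) (hne : v ≠ c) :
    s ++ c :: rest ∉ dfsB (s ++ [v]) := by
  intro hm
  have hp := dfsB_prefix _ _ hm
  have hvc : v = c := by simpa using hp
  exact hne hvc

theorem index?_flatMap_vowels (vs : List Char) (s rest : List Char) (c : Char) (r : Nat)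
    (hc : c ∈ vs)
    (hinner : PySem.List.index? (dfsB (s ++ [c])) (s ++ c :: rest) = some r) :
    PySem.List.index? (vs.flatMap (fun v => dfsB (s ++ [v]))) (s ++ c :: rest)
      = some (vs.idxOf c * pvS (s.length + 1) + r) := by
  induction vs with
  | nil => cases hc
  | cons v vs ih =>
    rw [List.flatMap_cons]
    by_cases hvc : v = c
    · subst hvc
      have hmem : s ++ v :: rest ∈ dfsB (s ++ [v]) :=
        (PySem.List.index?_isSome_iff _ _).mp (by rw [hinner]; rfl)
      rw [PySem.List.index?_append_of_mem _ hmem, hinner]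
      simp
    · have hc' : c ∈ vs := by
        rcases List.mem_cons.mp hc with rfl | h
        · exact absurd rfl hvc
        · exact h
      rw [index?_append_of_not_mem _ _ _ (not_mem_dfsB_of_ne s rest v c hvc),
          ih hc', dfsB_length]
      simp only [Option.map_some, List.idxOf_cons, List.length_append, List.length_cons,
        List.length_nil]
      have : (v == c) = false := by simpa using hvc
      rw [this]
      congr 1
      simp only [Nat.zero_add, cond_false]
      ring

theorem dfsB_index (w : List Char) : ∀ s : List Char, s.length + w.length ≤ 5 →
    (∀ c ∈ w, c ∈ pvVowels) →
    PySem.List.index? (dfsB s) (s ++ w) = some (pvRank w s.length) := by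
  induction w with
  | nil =>
    intro s _ _
    rw [dfsB.eq_def, List.append_nil]
    split
    · simpa [pvRank] using PySem.List.index?_cons_self s _
    · simp [pvRank]
  | cons c rest ih =>
    intro s hlen hv
    have hs : s.length < 5 := by simp at hlen; omega
    have hinner : PySem.List.index? (dfsB (s ++ [c])) (s ++ c :: rest)
        = some (pvRank rest (s.length + 1)) := by
      have := ih (s ++ [c]) (by simp at hlen ⊢; omega)
        (fun d hd => hv d (List.mem_cons_of_mem _ hd))
      simpa using this
    have hne : s ++ c :: rest ≠ s := by
      intro h; have := congrArg List.length h; simp at this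
    rw [dfsB.eq_def, dif_pos hs, PySem.List.index?_cons_of_ne _ (fun h => hne h.symm),
        index?_flatMap_vowels pvVowels s rest c _ (hv c List.mem_cons_self) hinner]
    simp only [Option.map_some, pvRank]
    congr 1
    omega

theorem pyGetD_weights (d : Nat) (hd : d ≤ 4) :
    PySem.List.pyGetD pvWeights (d : Int) 0 = (pvS (d + 1) : Nat) := by
  interval_cases d <;> simp [pvS, pvWeights, PySem.List.pyGetD]

theorem index?_vowels_getD (c : Char) (hc : c ∈ pvVowels) :
    ((PySem.List.index? pvVowels c).getD 0) = pvVowels.idxOf c := by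
  have : c = 'A' ∨ c = 'E' ∨ c = 'I' ∨ c = 'O' ∨ c = 'U' := by
    simpa [pvVowels] using hc
  rcases this with rfl | rfl | rfl | rfl | rfl <;> decide

theorem foldA (w : List Char) : ∀ (d : Nat) (acc : Int), d + w.length ≤ 5 →
    (∀ c ∈ w, c ∈ pvVowels) →
    (PySem.List.enumerate w (d : Int)).foldl
      (fun order p =>
        order + (((PySem.List.index? pvVowels p.2).getD 0 : Nat) : Int)
                * PySem.List.pyGetD pvWeights p.1 0 + 1) acc
      = acc + (pvRank w d : Int) := by
  induction w with
  | nil => intro d acc _ _; simp [PySem.List.enumerate_nil, pvRank]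
  | cons c rest ih =>
    intro d acc hlen hv
    have hd : d ≤ 4 := by simp at hlen; omega
    rw [PySem.List.enumerate_cons, List.foldl_cons]
    have : ((d : Int) + 1) = ((d + 1 : Nat) : Int) := by push_cast; ring
    rw [this, ih (d + 1) _ (by simp at hlen ⊢; omega)
          (fun x hx => hv x (List.mem_cons_of_mem _ hx))]
    rw [pvRank]
    simp only [index?_vowels_getD c (hv c List.mem_cons_self), pyGetD_weights d hd]
    push_cast
    ring

-- ===== VERDICT (by name: the statement is the Claim_ definition above) =====
theorem solution_spec : Claim_equal_solution := by
  intro word _ hpre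
  obtain ⟨hlen, hv'⟩ := hpre
  have hv : ∀ c ∈ word.toList, c ∈ pvVowels := by simpa using hv'
  unfold Spec_solution solution solution_alt
  have hB : PySem.List.index? (dfsB []) word.toList = some (pvRank word.toList 0) := by
    have := dfsB_index word.toList [] (by simpa using hlen) hv
    simpa using this
  have hA := foldA word.toList 0 0 (by simpa using hlen) hv
  rw [hB]
  simp only [Option.getD_some]
  rw [show ((0 : Nat) : Int) = (0 : Int) from rfl] at hA
  rw [hA]
  simp
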